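-- pv_equiv track=rewrite | github.com/IdanReed/AtariDeepLearning | mgdt_model_stats.py | _get_epoch_boundaries
-- ===== SOURCE A (Python) =====
-- from typing import List, Dict, Any, Optional, Tuple, Union
--
-- def _get_epoch_boundaries(train_stats: List[Dict[str, Any]]) -> List[int]:
--     boundaries = []
--     if not train_stats:
--         return boundaries
--
--     prev_epoch = train_stats[0].get("epoch", 1)
--     for s in train_stats:
--         curr_epoch = s.get("epoch", 1)
--         if curr_epoch != prev_epoch:
--             # Previous entry was end of epoch
--             boundaries.append(s.get("global_step", s.get("step", 0)) - 1)
--             prev_epoch = curr_epoch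
--
--     # Add final step as last boundary
--     last = train_stats[-1]
--     boundaries.append(last.get("global_step", last.get("step", len(train_stats))))
--
--     return boundaries
-- ===== SOURCE B (Python) =====
-- from typing import List, Dict, Any
--
-- def _get_epoch_boundaries(train_stats: List[Dict[str, Any]]) -> List[int]:
--     if not train_stats:
--         return []
--     # stage 1: split the list into maximal consecutive runs of equal epoch
--     groups = []
--     i, n = 0, len(train_stats)
--     while i < n:
--         e = train_stats[i].get("epoch", 1)
--         j = i + 1
--         while j < n and train_stats[j].get("epoch", 1) == e:
--             j += 1
--         groups.append(train_stats[i:j])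
--         i = j
--     # stage 2: one boundary just before the first entry of each non-first run,
--     # plus the final step
--     boundaries = [g[0].get("global_step", g[0].get("step", 0)) - 1
--                   for g in groups[1:]]
--     last = train_stats[-1]
--     boundaries.append(last.get("global_step", last.get("step", len(train_stats))))
--     return boundaries
-- ===== Notes on version B (the rewrite author's own statement) =====
-- stated objective: alternative
-- what changed: Replaces A's single stateful scan carrying a mutable prev_epoch with a two-stage group-then-derive algorithm: first split the list into maximal consecutive runs of equal epoch with an index-based run scanner, then read one boundary off the first element of each non-first run.
import Mathlib
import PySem

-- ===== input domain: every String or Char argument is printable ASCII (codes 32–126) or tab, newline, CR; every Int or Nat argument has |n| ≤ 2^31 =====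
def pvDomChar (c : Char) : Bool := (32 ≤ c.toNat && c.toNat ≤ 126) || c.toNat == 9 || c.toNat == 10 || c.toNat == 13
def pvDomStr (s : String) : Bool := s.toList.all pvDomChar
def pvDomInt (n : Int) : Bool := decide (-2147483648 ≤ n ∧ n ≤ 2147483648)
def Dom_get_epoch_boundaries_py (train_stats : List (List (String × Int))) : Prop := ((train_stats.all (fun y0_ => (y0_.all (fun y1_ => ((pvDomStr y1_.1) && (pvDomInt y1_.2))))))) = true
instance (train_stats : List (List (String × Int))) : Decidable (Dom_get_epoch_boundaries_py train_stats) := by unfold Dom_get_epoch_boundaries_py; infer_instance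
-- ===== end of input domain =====

-- B replaces A's single stateful prev-epoch scan with a two-stage
-- group-then-derive algorithm (split into maximal equal-epoch runs, then read
-- boundaries off the run heads); objective: alternative, same cost.

-- d.get(k, dflt) on an association list (first match wins)
def dictGet (s : List (String × Int)) (k : String) (d : Int) : Int :=
  match s.find? (fun p => p.1 == k) with
  | some p => p.2
  | none => d

-- ===== PORT A =====
def get_epoch_boundaries_py (train_stats : List (List (String × Int))) : List Int :=
  match train_stats with
  | [] => []
  | first :: rest =>
    let prev0 := dictGet first "epoch" 1
    let st := (first :: rest).foldl
      (fun (acc : List Int × Int) s =>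
        if dictGet s "epoch" 1 ≠ acc.2 then
          (acc.1 ++ [dictGet s "global_step" (dictGet s "step" 0) - 1],
           dictGet s "epoch" 1)
        else acc)
      (([] : List Int), prev0)
    let last := (first :: rest).getLast (by simp)
    st.1 ++ [dictGet last "global_step" (dictGet last "step" ((first :: rest).length : Int))]

-- ===== PORT B =====
-- s.get("epoch", 1), the run key of Source B's scanner
def runKey (s : List (String × Int)) : Int := dictGet s "epoch" 1

-- stage 1 of Source B: split into maximal consecutive runs of equal epoch
-- (the inner `while j < n and …` scan is the takeWhile, the advance of i the dropWhile)
def groupRuns : List (List (String × Int)) → List (List (List (String × Int)))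
  | [] => []
  | x :: xs =>
    (x :: xs.takeWhile (fun s => runKey s == runKey x)) ::
      groupRuns (xs.dropWhile (fun s => runKey s == runKey x))
termination_by l => l.length
decreasing_by
  simp only [List.length_cons]
  exact Nat.lt_succ_of_le (xs.length_dropWhile_le _)

def get_epoch_boundaries_py_alt (train_stats : List (List (String × Int))) : List Int :=
  match train_stats with
  | [] => []
  | first :: rest =>
    let groups := groupRuns (first :: rest)
    let boundaries := (groups.drop 1).map
      (fun g => dictGet (g.headD []) "global_step" (dictGet (g.headD []) "step" 0) - 1)
    let last := (first :: rest).getLast (by simp)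
    boundaries ++ [dictGet last "global_step" (dictGet last "step" ((first :: rest).length : Int))]

-- ===== PRECONDITION & SPEC =====
def Spec_get_epoch_boundaries_py (train_stats : List (List (String × Int))) (out : List Int) : Prop := out = get_epoch_boundaries_py_alt train_stats
instance (train_stats : List (List (String × Int))) (out : List Int) : Decidable (Spec_get_epoch_boundaries_py train_stats out) := by unfold Spec_get_epoch_boundaries_py; infer_instance

-- ===== CLAIM (what is proved, stated in full; the proofs are below) =====
def Claim_equal_get_epoch_boundaries_py : Prop := ∀ (train_stats : List (List (String × Int))), Dom_get_epoch_boundaries_py train_stats → Spec_get_epoch_boundaries_py train_stats (get_epoch_boundaries_py train_stats)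

-- ===== LEMMAS AND PROOFS =====

-- A's loop invariant: after consuming an element x, the loop state is
-- (acc, epoch x); running it over the remaining l appends exactly one value
-- f p.2 for each adjacent pair of x :: l whose epochs differ.
theorem loop_eq_pairs (f : List (String × Int) → Int)
    (l : List (List (String × Int))) (x : List (String × Int)) (acc : List Int) :
    (l.foldl
      (fun (acc : List Int × Int) s =>
        if dictGet s "epoch" 1 ≠ acc.2 then
          (acc.1 ++ [f s], dictGet s "epoch" 1)
        else acc)
      (acc, dictGet x "epoch" 1)).1 =
    acc ++ (((x :: l).zip l).filter
        (fun p => runKey p.1 != runKey p.2)).map (fun p => f p.2) := by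
  induction l generalizing x acc with
  | nil => simp
  | cons y l ih =>
    simp only [List.foldl_cons, List.zip_cons_cons, List.filter_cons]
    by_cases h : dictGet y "epoch" 1 = dictGet x "epoch" 1
    · rw [if_neg (by simp [h]), ← h, ih y acc]
      simp [runKey, h]
    · rw [if_pos h, ih y (acc ++ [f y])]
      simp [runKey, bne_iff_ne, Ne.symm h, List.append_assoc]

-- B's grouping invariant: the heads of the non-first runs of x :: l are exactly
-- the second components of the adjacent pairs of x :: l whose epochs differ.
theorem runs_tail_heads (f : List (String × Int) → Int)
    (l : List (List (String × Int))) (x : List (String × Int)) :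
    ((groupRuns (x :: l)).drop 1).map (fun g => f (g.headD [])) =
    (((x :: l).zip l).filter
        (fun p => runKey p.1 != runKey p.2)).map (fun p => f p.2) := by
  induction l generalizing x with
  | nil => simp [groupRuns]
  | cons y l ih =>
    rw [groupRuns]
    simp only [List.drop_one, List.tail_cons, List.dropWhile_cons,
      List.zip_cons_cons, List.filter_cons]
    have hy := ih y
    rw [groupRuns] at hy
    simp only [List.drop_one, List.tail_cons] at hy
    by_cases h : runKey y = runKey x
    · rw [if_pos (by simp [h])]
      have hP : (fun s => runKey s == runKey x) = (fun s => runKey s == runKey y) := by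
        funext s; rw [h]
      rw [hP, hy]
      simp [h]
    · rw [if_neg (by simp [h])]
      rw [groupRuns]
      simp only [List.map_cons, List.headD_cons]
      rw [hy]
      simp [bne_iff_ne, Ne.symm h]

-- ===== VERDICT (by name: the statement is the Claim_ definition above) =====
theorem get_epoch_boundaries_py_spec : Claim_equal_get_epoch_boundaries_py := by
  intro ts _
  unfold Spec_get_epoch_boundaries_py get_epoch_boundaries_py get_epoch_boundaries_py_alt
  cases ts with
  | nil => rfl
  | cons first rest =>
    simp only [List.foldl_cons]
    split_ifs with hc
    · exact absurd rfl hc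
    · rw [loop_eq_pairs (fun s => dictGet s "global_step" (dictGet s "step" 0) - 1) rest first []]
      rw [runs_tail_heads (fun s => dictGet s "global_step" (dictGet s "step" 0) - 1) rest first]
      simp
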